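-- pv_equiv track=rewrite | github.com/Code-With-TalhaBhai/python-classes | DSA/Leetcode_General/lc_2094.py | findEvenNumbers2
-- ===== SOURCE A (Python) =====
-- def findEvenNumbers2(digits):
--     import collections
--     final = []
--     counter = collections.Counter(digits)
--
--     for i in range(1,10):
--         if counter[i] == 0:
--             continue
--         counter[i] -= 1
--         for j in range(0,10):
--             if counter[j] == 0:
--                 continue
--             counter[j] -= 1
--             for k in range(0,10,2):
--                 if counter[k] == 0:
--                     continue
--                 num = i * 100 + j * 10 + k
--                 final.append(num)
--             counter[j] += 1
--         counter[i] += 1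
--     return final
-- ===== SOURCE B (Python) =====
-- def findEvenNumbers2(digits):
--     from collections import Counter
--     counter = Counter(digits)
--     result = []
--     for num in range(100, 1000, 2):
--         trip = [num // 100, num // 10 % 10, num % 10]
--         if all(trip.count(d) <= counter[d] for d in trip):
--             result.append(num)
--     return result
-- ===== Notes on version B (the rewrite author's own statement) =====
-- stated objective: alternative
-- what changed: Instead of A's triple nested digit loop with Counter decrement/restore bookkeeping, B iterates once over the even numbers 100..998 and keeps each whose digit multiset is contained in the input's Counter.
import Mathlib
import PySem

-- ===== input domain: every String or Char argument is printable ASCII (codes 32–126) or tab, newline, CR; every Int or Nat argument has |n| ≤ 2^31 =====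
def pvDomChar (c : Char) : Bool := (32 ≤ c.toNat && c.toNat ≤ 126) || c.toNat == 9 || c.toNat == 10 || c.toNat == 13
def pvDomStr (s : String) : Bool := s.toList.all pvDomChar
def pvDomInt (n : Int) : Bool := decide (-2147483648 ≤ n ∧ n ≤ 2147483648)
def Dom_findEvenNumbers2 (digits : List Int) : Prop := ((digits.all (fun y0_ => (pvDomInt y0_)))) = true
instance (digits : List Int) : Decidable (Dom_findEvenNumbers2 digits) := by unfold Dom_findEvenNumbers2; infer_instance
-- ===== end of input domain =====

-- B replaces A's triple nested digit loop (with Counter decrement/restore) by a single scan of the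
-- even numbers 100..998 filtered by digit-multiset containment in the input's Counter (objective: alternative).


-- ===== PORT A =====
-- Python's 'counter[x] -= 1 … inner loop … counter[x] += 1' (mutate, run the inner loop, restore) is
-- modelled by let-binding the decremented dict for the inner loop only; the outer level keeps the
-- undecremented dict, which is exactly the restored state.
def findEvenNumbers2 (digits : List Int) : List Int :=
  let counter := PySem.Dict.counter digits
  (PySem.List.pyRange 1 10 1).foldl (fun final i =>
    if counter.getD i 0 = 0 then final
    else
      let c1 := counter.insert i (counter.getD i 0 - 1)
      (PySem.List.pyRange 0 10 1).foldl (fun final j =>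
        if c1.getD j 0 = 0 then final
        else
          let c2 := c1.insert j (c1.getD j 0 - 1)
          (PySem.List.pyRange 0 10 2).foldl (fun final k =>
            if c2.getD k 0 = 0 then final
            else final ++ [i * 100 + j * 10 + k]) final) final) []

-- ===== PORT B =====
def findEvenNumbers2_alt (digits : List Int) : List Int :=
  let counter := PySem.Dict.counter digits
  (PySem.List.pyRange 100 1000 2).foldl (fun result num =>
    let trip := [PySem.Int.floordiv num 100,
                 PySem.Int.mod (PySem.Int.floordiv num 10) 10,
                 PySem.Int.mod num 10]
    if trip.all (fun d => decide ((trip.count d : Int) ≤ counter.getD d 0)) then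
      result ++ [num]
    else result) []

-- ===== PRECONDITION & SPEC =====
def Spec_findEvenNumbers2 (digits : List Int) (out : List Int) : Prop := out = findEvenNumbers2_alt digits
instance (digits : List Int) (out : List Int) : Decidable (Spec_findEvenNumbers2 digits out) := by unfold Spec_findEvenNumbers2; infer_instance

-- ===== CLAIM (what is proved, stated in full; the proofs are below) =====
def Claim_equal_findEvenNumbers2 : Prop := ∀ (digits : List Int), Dom_findEvenNumbers2 digits → Spec_findEvenNumbers2 digits (findEvenNumbers2 digits)

-- ===== LEMMAS AND PROOFS =====

-- generic shapes of the two kinds of conditional-append loops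
lemma foldl_skip {α : Type} (l : List α) (p : α → Prop) [DecidablePred p] (g : α → List Int)
    (acc : List Int) :
    l.foldl (fun acc x => if p x then acc else acc ++ g x) acc
      = acc ++ l.flatMap (fun x => if p x then [] else g x) := by
  have h : (fun (acc : List Int) (x : α) => if p x then acc else acc ++ g x)
      = fun acc x => acc ++ (if p x then [] else g x) := by
    funext acc x; split <;> simp
  rw [h, PySem.List.foldl_append_eq_flatMap]

lemma foldl_take {α : Type} (l : List α) (p : α → Bool) (g : α → List Int) (acc : List Int) :
    l.foldl (fun acc x => if p x then acc ++ g x else acc) acc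
      = acc ++ l.flatMap (fun x => if p x then g x else []) := by
  have h : (fun (acc : List Int) (x : α) => if p x then acc ++ g x else acc)
      = fun acc x => acc ++ (if p x then g x else []) := by
    funext acc x; split <;> simp
  rw [h, PySem.List.foldl_append_eq_flatMap]

lemma if_nil_flatMap {α : Type} (p : Prop) [Decidable p] (l : List α) (f : α → List Int) :
    (if p then ([] : List Int) else l.flatMap f) = l.flatMap (fun x => if p then [] else f x) := by
  split <;> simp

-- A's loops flattened, from the inside out
def inner_flat (c2 : PySem.Dict Int Int) (i j : Int) : List Int :=
  (PySem.List.pyRange 0 10 2).flatMap (fun k => if c2.getD k 0 = 0 then [] else [i * 100 + j * 10 + k])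

def mid_flat (c1 : PySem.Dict Int Int) (i : Int) : List Int :=
  (PySem.List.pyRange 0 10 1).flatMap (fun j =>
    if c1.getD j 0 = 0 then [] else inner_flat (c1.insert j (c1.getD j 0 - 1)) i j)

lemma A_eq (digits : List Int) :
    findEvenNumbers2 digits
      = (PySem.List.pyRange 1 10 1).flatMap (fun i =>
          if (PySem.Dict.counter digits).getD i 0 = 0 then []
          else mid_flat
            ((PySem.Dict.counter digits).insert i ((PySem.Dict.counter digits).getD i 0 - 1)) i) := by
  have hmid : ∀ (c1 : PySem.Dict Int Int) (i : Int) (final : List Int),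
      (PySem.List.pyRange 0 10 1).foldl (fun final j =>
        if c1.getD j 0 = 0 then final
        else (PySem.List.pyRange 0 10 2).foldl (fun final k =>
          if (c1.insert j (c1.getD j 0 - 1)).getD k 0 = 0 then final
          else final ++ [i * 100 + j * 10 + k]) final) final
      = final ++ mid_flat c1 i := by
    intro c1 i final
    have hb : (fun (final : List Int) (j : Int) =>
        if c1.getD j 0 = 0 then final
        else (PySem.List.pyRange 0 10 2).foldl (fun final k =>
          if (c1.insert j (c1.getD j 0 - 1)).getD k 0 = 0 then final
          else final ++ [i * 100 + j * 10 + k]) final)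
        = fun final j => if c1.getD j 0 = 0 then final
            else final ++ inner_flat (c1.insert j (c1.getD j 0 - 1)) i j := by
      funext final j
      by_cases h : c1.getD j 0 = 0
      · simp [h]
      · simp only [h, if_false]
        exact foldl_skip _ _ _ _
    rw [hb, foldl_skip]
    rfl
  have htop : (fun (final : List Int) (i : Int) =>
      if (PySem.Dict.counter digits).getD i 0 = 0 then final
      else (PySem.List.pyRange 0 10 1).foldl (fun final j =>
        if ((PySem.Dict.counter digits).insert i ((PySem.Dict.counter digits).getD i 0 - 1)).getD j 0 = 0 then final
        else (PySem.List.pyRange 0 10 2).foldl (fun final k =>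
          if (((PySem.Dict.counter digits).insert i ((PySem.Dict.counter digits).getD i 0 - 1)).insert j
              (((PySem.Dict.counter digits).insert i ((PySem.Dict.counter digits).getD i 0 - 1)).getD j 0 - 1)).getD k 0 = 0
          then final else final ++ [i * 100 + j * 10 + k]) final) final)
      = fun final i => if (PySem.Dict.counter digits).getD i 0 = 0 then final
          else final ++ mid_flat
            ((PySem.Dict.counter digits).insert i ((PySem.Dict.counter digits).getD i 0 - 1)) i := by
    funext final i
    by_cases h : (PySem.Dict.counter digits).getD i 0 = 0
    · simp [h]
    · simp only [h, if_false]
      exact hmid _ _ _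
  simp only [findEvenNumbers2]
  rw [htop, foldl_skip]
  simp

-- B's loop as a filter over the even numbers, written as a flatMap
def pB (digits : List Int) (num : Int) : Bool :=
  [PySem.Int.floordiv num 100, PySem.Int.mod (PySem.Int.floordiv num 10) 10,
   PySem.Int.mod num 10].all (fun d =>
    decide ((([PySem.Int.floordiv num 100, PySem.Int.mod (PySem.Int.floordiv num 10) 10,
               PySem.Int.mod num 10].count d : Int) ≤ (PySem.Dict.counter digits).getD d 0)))

lemma B_eq (digits : List Int) :
    findEvenNumbers2_alt digits
      = (PySem.List.pyRange 100 1000 2).flatMap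
          (fun num => if pB digits num then [num] else []) := by
  show (PySem.List.pyRange 100 1000 2).foldl
      (fun result num => if pB digits num then result ++ [num] else result) [] = _
  rw [foldl_take]
  simp

set_option maxRecDepth 10000 in
set_option maxHeartbeats 2000000 in
lemma range_decomp :
    PySem.List.pyRange 100 1000 2
      = (PySem.List.pyRange 1 10 1).flatMap (fun i =>
          (PySem.List.pyRange 0 10 1).flatMap (fun j =>
            (PySem.List.pyRange 0 10 2).map (fun k => i * 100 + j * 10 + k))) := by
  decide

lemma pointwise (digits : List Int) (i j k : Int) (hi1 : 1 ≤ i) (hi2 : i < 10)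
    (hj1 : 0 ≤ j) (hj2 : j < 10) (hk1 : 0 ≤ k) (hk2 : k < 10) :
    (if (PySem.Dict.counter digits).getD i 0 = 0 then []
     else if ((PySem.Dict.counter digits).insert i ((PySem.Dict.counter digits).getD i 0 - 1)).getD j 0 = 0 then []
     else if (((PySem.Dict.counter digits).insert i ((PySem.Dict.counter digits).getD i 0 - 1)).insert j
          (((PySem.Dict.counter digits).insert i ((PySem.Dict.counter digits).getD i 0 - 1)).getD j 0 - 1)).getD k 0 = 0
        then ([] : List Int)
     else [i * 100 + j * 10 + k])
    = if pB digits (i * 100 + j * 10 + k) then [i * 100 + j * 10 + k] else [] := by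
  have e1 : PySem.Int.floordiv (i * 100 + j * 10 + k) 100 = i := by
    rw [PySem.Int.floordiv_eq_ediv_of_pos (by norm_num)]; omega
  have e2 : PySem.Int.mod (PySem.Int.floordiv (i * 100 + j * 10 + k) 10) 10 = j := by
    rw [PySem.Int.floordiv_eq_ediv_of_pos (by norm_num),
        PySem.Int.mod_eq_emod_of_pos (by norm_num)]; omega
  have e3 : PySem.Int.mod (i * 100 + j * 10 + k) 10 = k := by
    rw [PySem.Int.mod_eq_emod_of_pos (by norm_num)]; omega
  simp only [pB, e1, e2, e3, PySem.Dict.getD_insert, PySem.Dict.getD_counter,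
    List.all_cons, List.all_nil, List.count_cons, List.count_nil, beq_iff_eq,
    Bool.and_true, Bool.and_eq_true, decide_eq_true_eq]
  by_cases hji : j = i
  · subst hji
    by_cases hkj : k = j
    · subst hkj
      split_ifs <;> first | rfl | (exfalso; omega)
    · split_ifs <;> first | rfl | (exfalso; omega)
  · by_cases hki : k = i
    · subst hki
      split_ifs <;> first | rfl | (exfalso; omega)
    · by_cases hkj : k = j
      · subst hkj
        split_ifs <;> first | rfl | (exfalso; omega)
      · split_ifs <;> first | rfl | (exfalso; omega)

-- ===== VERDICT (by name: the statement is the Claim_ definition above) =====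
theorem findEvenNumbers2_spec : Claim_equal_findEvenNumbers2 := by
  intro digits _
  unfold Spec_findEvenNumbers2
  rw [A_eq, B_eq, range_decomp]
  simp only [List.flatMap_assoc, List.flatMap_map]
  refine List.flatMap_congr fun i hi => ?_
  rw [PySem.List.mem_pyRange_one] at hi
  simp only [mid_flat]
  rw [if_nil_flatMap]
  refine List.flatMap_congr fun j hj => ?_
  rw [PySem.List.mem_pyRange_one] at hj
  simp only [inner_flat]
  rw [if_nil_flatMap, if_nil_flatMap]
  refine List.flatMap_congr fun k hk => ?_
  rw [PySem.List.mem_pyRange_iff_of_pos (by norm_num)] at hk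
  exact pointwise digits i j k hi.1 hi.2 hj.1 hj.2 hk.1 hk.2.1
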